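-- pv_equiv track=rewrite | github.com/Pancio-code/Fondamenti-informatica-I | esami/esame2/ProvaAlCalcolatore/Compito_A/Eserc1/A_Ex1_Sol.py | A_Ex1
-- ===== SOURCE A (Python) =====
-- def A_Ex1(l):
--     ris=[]
--     for i in range(len(l)):
--         for j in range(len(l[i])):
--             if i % 2 == 0 and j % 2 == 0 and l[i][j] not in ris:
--                 ris.append(l[i][j])
--             elif i % 2 != 0 and j % 2 != 0 and l[i][j] not in ris:
--                 ris.append(l[i][j])
--     ris.sort()
--     return ris
-- ===== SOURCE B (Python) =====
-- def A_Ex1(l):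
--     vals = []
--     for i in range(len(l)):
--         for j in range(len(l[i])):
--             if i % 2 == j % 2:
--                 vals.append(l[i][j])
--     vals.sort()
--     ris = []
--     for v in vals:
--         if not ris or ris[-1] != v:
--             ris.append(v)
--     return ris
-- ===== Notes on version B (the rewrite author's own statement) =====
-- stated objective: faster
-- what changed: B collects all same-parity-index elements with duplicates (no 'not in' membership scan), sorts once, and deduplicates adjacent equal values in a single pass, replacing A's O(k^2) inline dedup.
import Mathlib
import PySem

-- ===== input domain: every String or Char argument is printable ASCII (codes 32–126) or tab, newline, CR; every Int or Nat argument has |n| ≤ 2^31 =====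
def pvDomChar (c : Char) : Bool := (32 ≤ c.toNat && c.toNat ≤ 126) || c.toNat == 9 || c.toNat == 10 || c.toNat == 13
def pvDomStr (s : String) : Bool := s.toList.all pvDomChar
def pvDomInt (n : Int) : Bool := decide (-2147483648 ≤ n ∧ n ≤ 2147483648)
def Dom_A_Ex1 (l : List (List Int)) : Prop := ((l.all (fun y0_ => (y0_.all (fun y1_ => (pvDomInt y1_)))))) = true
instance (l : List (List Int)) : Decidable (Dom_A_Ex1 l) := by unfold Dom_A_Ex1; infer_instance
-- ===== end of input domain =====

-- B replaces A's inline O(k^2) 'not in' dedup by: collect with duplicates, sort once, dedup adjacent duplicates in one pass.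

-- ===== PORT A =====
def A_Ex1 (l : List (List Int)) : List Int :=
  let ris : List Int :=
    (PySem.List.pyRange 0 (PySem.List.len l) 1).foldl (fun ris i =>
      let row := PySem.List.pyGetD l i []
      (PySem.List.pyRange 0 (PySem.List.len row) 1).foldl (fun ris j =>
        let v := PySem.List.pyGetD row j 0
        if PySem.Int.mod i 2 = 0 ∧ PySem.Int.mod j 2 = 0 ∧ v ∉ ris then ris ++ [v]
        else if PySem.Int.mod i 2 ≠ 0 ∧ PySem.Int.mod j 2 ≠ 0 ∧ v ∉ ris then ris ++ [v]
        else ris) ris) []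
  PySem.List.sorted ris (fun x => x) false

-- ===== PORT B =====
def A_Ex1_alt (l : List (List Int)) : List Int :=
  let vals : List Int :=
    (PySem.List.pyRange 0 (PySem.List.len l) 1).foldl (fun vals i =>
      let row := PySem.List.pyGetD l i []
      (PySem.List.pyRange 0 (PySem.List.len row) 1).foldl (fun vals j =>
        if PySem.Int.mod i 2 = PySem.Int.mod j 2 then vals ++ [PySem.List.pyGetD row j 0]
        else vals) vals) []
  let vals := PySem.List.sorted vals (fun x => x) false
  vals.foldl (fun ris v =>
    if ris = [] ∨ PySem.List.pyGet? ris (-1) ≠ some v then ris ++ [v] else ris) []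

-- ===== PRECONDITION & SPEC =====
def Spec_A_Ex1 (l : List (List Int)) (out : List Int) : Prop := out = A_Ex1_alt l
instance (l : List (List Int)) (out : List Int) : Decidable (Spec_A_Ex1 l out) := by unfold Spec_A_Ex1; infer_instance

-- ===== CLAIM (what is proved, stated in full; the proofs are below) =====
def Claim_equal_A_Ex1 : Prop := ∀ (l : List (List Int)), Dom_A_Ex1 l → Spec_A_Ex1 l (A_Ex1 l)

-- ===== LEMMAS AND PROOFS =====

-- membership-dedup fold (A's accumulator step, condition already merged)
def memFold (zs : List Int) (acc : List Int) : List Int :=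
  zs.foldl (fun r v => if v ∉ r then r ++ [v] else r) acc

theorem mem_memFold (zs acc : List Int) (v : Int) :
    v ∈ memFold zs acc ↔ v ∈ acc ∨ v ∈ zs := by
  induction zs generalizing acc with
  | nil => simp [memFold]
  | cons z zs ih =>
    simp only [memFold, List.foldl_cons] at *
    by_cases hz : z ∈ acc
    · rw [if_neg (not_not_intro hz), ih]
      simp only [List.mem_cons]
      constructor
      · rintro (h | h)
        · exact Or.inl h
        · exact Or.inr (Or.inr h)
      · rintro (h | rfl | h)
        · exact Or.inl h
        · exact Or.inl hz
        · exact Or.inr h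
    · rw [if_pos hz, ih]
      simp only [List.mem_append, List.mem_cons]
      tauto

theorem nodup_memFold (zs acc : List Int) (h : acc.Nodup) : (memFold zs acc).Nodup := by
  induction zs generalizing acc with
  | nil => simpa [memFold]
  | cons z zs ih =>
    simp only [memFold, List.foldl_cons]
    by_cases hz : z ∈ acc
    · rw [if_neg (not_not_intro hz)]
      exact ih acc h
    · rw [if_pos hz]
      apply ih
      rw [List.nodup_append]
      exact ⟨h, List.nodup_singleton z, by
        intro a ha b hb
        simp at hb
        subst hb
        exact fun he => hz (he ▸ ha)⟩

theorem memFold_cons (x : Int) (zs acc : List Int) :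
    memFold (x :: zs) acc = memFold zs (if x ∉ acc then acc ++ [x] else acc) := rfl

theorem memFold_append (xs ys acc : List Int) :
    memFold (xs ++ ys) acc = memFold ys (memFold xs acc) := by
  simp [memFold, List.foldl_append]

theorem memFold_flatMap {γ : Type} (qs : List γ) (G : γ → List Int) (pre : List Int) :
    qs.foldl (fun r q => memFold (G q) r) pre = memFold (qs.flatMap G) pre := by
  induction qs generalizing pre with
  | nil => simp [memFold]
  | cons q qs ih => simp only [List.foldl_cons, List.flatMap_cons, memFold_append]; rw [ih]

-- adjacency-dedup fold (B's second pass)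
def adjDedup (s : List Int) : List Int :=
  s.foldl (fun ris v =>
    if ris = [] ∨ PySem.List.pyGet? ris (-1) ≠ some v then ris ++ [v] else ris) []

theorem le_getLast_of_pairwise_lt (acc : List Int) (h : acc.Pairwise (· < ·))
    (x : Int) (hx : x ∈ acc) (hne : acc ≠ []) : x ≤ acc.getLast hne := by
  induction acc with
  | nil => simp at hx
  | cons a t ih =>
    rw [List.pairwise_cons] at h
    cases t with
    | nil => simp at hx; simp [hx, List.getLast]
    | cons b u =>
      rw [List.getLast_cons (by simp)]
      rcases List.mem_cons.1 hx with rfl | hx'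
      · exact le_of_lt (h.1 _ (List.getLast_mem (by simp)))
      · exact ih h.2 hx' (by simp)

theorem adjDedup_mem_aux (s acc : List Int) (v : Int) :
    v ∈ s.foldl (fun ris v =>
      if ris = [] ∨ PySem.List.pyGet? ris (-1) ≠ some v then ris ++ [v] else ris) acc ↔
    v ∈ acc ∨ v ∈ s := by
  induction s generalizing acc with
  | nil => simp
  | cons z s ih =>
    simp only [List.foldl_cons]
    rw [PySem.List.pyGet?_neg_one]
    by_cases hc : acc = [] ∨ acc.getLast? ≠ some z
    · rw [if_pos hc, ih]
      simp only [List.mem_append, List.mem_cons]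
      tauto
    · rw [if_neg hc, ih]
      rw [not_or, not_not] at hc
      have hz : z ∈ acc := by
        have hne : acc ≠ [] := hc.1
        have h2 : z = acc.getLast hne :=
          Option.some.inj (hc.2.symm.trans (List.getLast?_eq_some_getLast hne))
        rw [h2]
        exact List.getLast_mem hne
      simp only [List.mem_cons]
      constructor
      · tauto
      · rintro (h | rfl | h)
        · exact Or.inl h
        · exact Or.inl hz
        · exact Or.inr h

theorem adjDedup_pairwise_aux (s acc : List Int)
    (hacc : acc.Pairwise (· < ·))
    (hs : s.Pairwise (· ≤ ·))
    (hcross : ∀ x ∈ acc, ∀ y ∈ s, x ≤ y) :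
    (s.foldl (fun ris v =>
      if ris = [] ∨ PySem.List.pyGet? ris (-1) ≠ some v then ris ++ [v] else ris) acc).Pairwise (· < ·) := by
  induction s generalizing acc with
  | nil => simpa
  | cons z s ih =>
    simp only [List.foldl_cons]
    rw [PySem.List.pyGet?_neg_one]
    rw [List.pairwise_cons] at hs
    by_cases hc : acc = [] ∨ acc.getLast? ≠ some z
    · rw [if_pos hc]
      apply ih
      · rw [List.pairwise_append]
        refine ⟨hacc, by simp, ?_⟩
        intro x hx y hy
        simp only [List.mem_singleton] at hy; subst hy
        have hne : acc ≠ [] := by rintro rfl; simp at hx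
        rcases lt_or_eq_of_le (hcross x hx y (by simp)) with hlt | heq
        · exact hlt
        · exfalso
          subst heq
          have hlastne : acc.getLast? ≠ some x := by
            rcases hc with hc' | hc'
            · exact absurd hc' hne
            · exact hc'
          have h1 : x ≤ acc.getLast hne := le_getLast_of_pairwise_lt acc hacc x hx hne
          have h2 : acc.getLast hne ≤ x := hcross _ (List.getLast_mem hne) x (by simp)
          have : acc.getLast? = some x := by
            rw [List.getLast?_eq_some_getLast hne]
            exact congrArg some (le_antisymm h2 h1)
          exact hlastne this
      · exact hs.2
      · intro x hx y hy
        rcases List.mem_append.1 hx with hx' | hx'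
        · exact le_trans (hcross x hx' z (by simp)) (hs.1 y hy)
        · simp only [List.mem_singleton] at hx'; subst hx'; exact hs.1 y hy
    · rw [if_neg hc]
      exact ih acc hacc hs.2 (fun x hx y hy => le_trans (hcross x hx z (by simp)) (hs.1 y hy))

-- merge A's two-branch condition into B's single parity test
theorem parity_merge (i j : Int) (v : Int) (r : List Int) :
    (if PySem.Int.mod i 2 = 0 ∧ PySem.Int.mod j 2 = 0 ∧ v ∉ r then r ++ [v]
     else if PySem.Int.mod i 2 ≠ 0 ∧ PySem.Int.mod j 2 ≠ 0 ∧ v ∉ r then r ++ [v]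
     else r)
    = (if PySem.Int.mod i 2 = PySem.Int.mod j 2 then (if v ∉ r then r ++ [v] else r) else r) := by
  have hi := PySem.Int.mod_eq_emod_of_pos (a := i) (b := 2) (by norm_num)
  have hj := PySem.Int.mod_eq_emod_of_pos (a := j) (b := 2) (by norm_num)
  have h2i : i % 2 = 0 ∨ i % 2 = 1 := Int.emod_two_eq_zero_or_one i
  have h2j : j % 2 = 0 ∨ j % 2 = 1 := Int.emod_two_eq_zero_or_one j
  rw [hi, hj]
  rcases h2i with h | h <;> rcases h2j with h' | h' <;> simp [h, h']

-- an index-fold with a body using (j, xs[j]) is a fold over enumerate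
theorem foldl_idx_enumerate {α β : Type} (xs : List α) (g : β → Int → α → β) (init : β) (d : α) :
    (PySem.List.pyRange 0 (PySem.List.len xs) 1).foldl (fun acc j => g acc j (PySem.List.pyGetD xs j d)) init
    = (PySem.List.enumerate xs 0).foldl (fun acc p => g acc p.1 p.2) init := by
  rw [PySem.List.enumerate_eq_map_pyRange (d := d), List.foldl_map]

-- conditional memFold over an enumerate equals memFold over the filtered values
theorem foldl_cond_memFold (ps : List (Int × Int)) (p : Int × Int → Bool) (acc : List Int) :
    ps.foldl (fun r q => if p q then (if q.2 ∉ r then r ++ [q.2] else r) else r) acc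
    = memFold ((ps.filter p).map (·.2)) acc := by
  induction ps generalizing acc with
  | nil => simp [memFold]
  | cons q ps ih =>
    simp only [List.foldl_cons]
    by_cases hq : p q
    · rw [if_pos hq, show List.filter p (q :: ps) = q :: List.filter p ps by
        simp [hq], List.map_cons, memFold_cons]
      exact ih _
    · rw [if_neg hq, show List.filter p (q :: ps) = List.filter p ps by
        simp [hq]]
      exact ih acc

-- conditional append fold over an enumerate equals the filtered values appended
theorem foldl_cond_append (ps : List (Int × Int)) (p : Int × Int → Bool) (acc : List Int) :
    ps.foldl (fun r q => if p q then r ++ [q.2] else r) acc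
    = acc ++ (ps.filter p).map (·.2) := by
  induction ps generalizing acc with
  | nil => simp
  | cons q ps ih =>
    by_cases hq : p q <;> simp [hq, ih]

-- the stream of same-parity-index values
def pvVals (l : List (List Int)) : List Int :=
  (PySem.List.enumerate l 0).flatMap (fun p =>
    ((PySem.List.enumerate p.2 0).filter
      (fun q => PySem.Int.mod p.1 2 == PySem.Int.mod q.1 2)).map (·.2))

theorem A_eq_sorted_memFold (l : List (List Int)) :
    A_Ex1 l = PySem.List.sorted (memFold (pvVals l) []) (fun x => x) false := by
  unfold A_Ex1
  rw [foldl_idx_enumerate l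
    (fun r i row0 => (PySem.List.pyRange 0 (PySem.List.len row0) 1).foldl (fun ris j =>
        let v := PySem.List.pyGetD row0 j 0
        if PySem.Int.mod i 2 = 0 ∧ PySem.Int.mod j 2 = 0 ∧ v ∉ ris then ris ++ [v]
        else if PySem.Int.mod i 2 ≠ 0 ∧ PySem.Int.mod j 2 ≠ 0 ∧ v ∉ ris then ris ++ [v]
        else ris) r) [] []]
  unfold pvVals
  have hrow : ∀ (p : Int × List Int) (acc : List Int),
      (PySem.List.pyRange 0 (PySem.List.len p.2) 1).foldl (fun ris j =>
        let v := PySem.List.pyGetD p.2 j 0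
        if PySem.Int.mod p.1 2 = 0 ∧ PySem.Int.mod j 2 = 0 ∧ v ∉ ris then ris ++ [v]
        else if PySem.Int.mod p.1 2 ≠ 0 ∧ PySem.Int.mod j 2 ≠ 0 ∧ v ∉ ris then ris ++ [v]
        else ris) acc
      = memFold (((PySem.List.enumerate p.2 0).filter
          (fun q => PySem.Int.mod p.1 2 == PySem.Int.mod q.1 2)).map (·.2)) acc := by
    intro p acc
    rw [foldl_idx_enumerate p.2 (fun r j v =>
      if PySem.Int.mod p.1 2 = 0 ∧ PySem.Int.mod j 2 = 0 ∧ v ∉ r then r ++ [v]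
      else if PySem.Int.mod p.1 2 ≠ 0 ∧ PySem.Int.mod j 2 ≠ 0 ∧ v ∉ r then r ++ [v]
      else r) acc 0]
    rw [← foldl_cond_memFold _ (fun q => PySem.Int.mod p.1 2 == PySem.Int.mod q.1 2)]
    refine PySem.List.foldl_congr_mem _ _ _ _ ?_
    intro r q _
    simpa using parity_merge p.1 q.1 q.2 r
  have step : ∀ (qs : List (Int × List Int)) (pre : List Int),
      qs.foldl (fun r p => (PySem.List.pyRange 0 (PySem.List.len p.2) 1).foldl (fun ris j =>
          let v := PySem.List.pyGetD p.2 j 0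
          if PySem.Int.mod p.1 2 = 0 ∧ PySem.Int.mod j 2 = 0 ∧ v ∉ ris then ris ++ [v]
          else if PySem.Int.mod p.1 2 ≠ 0 ∧ PySem.Int.mod j 2 ≠ 0 ∧ v ∉ ris then ris ++ [v]
          else ris) r) pre
      = qs.foldl (fun r p => memFold (((PySem.List.enumerate p.2 0).filter
          (fun q => PySem.Int.mod p.1 2 == PySem.Int.mod q.1 2)).map (·.2)) r) pre := by
    intro qs pre
    exact PySem.List.foldl_congr_mem _ _ _ _ (fun acc q _ => hrow q acc)
  rw [step]
  exact congrArg (fun z => PySem.List.sorted z (fun x => x) false) (memFold_flatMap _ _ [])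

theorem B_eq_adjDedup_sorted (l : List (List Int)) :
    A_Ex1_alt l = adjDedup (PySem.List.sorted (pvVals l) (fun x => x) false) := by
  unfold A_Ex1_alt adjDedup
  rw [foldl_idx_enumerate l
    (fun r i row0 => (PySem.List.pyRange 0 (PySem.List.len row0) 1).foldl (fun vals j =>
        if PySem.Int.mod i 2 = PySem.Int.mod j 2 then vals ++ [PySem.List.pyGetD row0 j 0]
        else vals) r) [] []]
  unfold pvVals
  have hrow : ∀ (p : Int × List Int) (acc : List Int),
      (PySem.List.pyRange 0 (PySem.List.len p.2) 1).foldl (fun vals j =>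
        if PySem.Int.mod p.1 2 = PySem.Int.mod j 2 then vals ++ [PySem.List.pyGetD p.2 j 0]
        else vals) acc
      = acc ++ ((PySem.List.enumerate p.2 0).filter
          (fun q => PySem.Int.mod p.1 2 == PySem.Int.mod q.1 2)).map (·.2) := by
    intro p acc
    rw [foldl_idx_enumerate p.2 (fun r j v =>
      if PySem.Int.mod p.1 2 = PySem.Int.mod j 2 then r ++ [v] else r) acc 0]
    rw [← foldl_cond_append _ (fun q => PySem.Int.mod p.1 2 == PySem.Int.mod q.1 2)]
    refine PySem.List.foldl_congr_mem _ _ _ _ ?_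
    intro r q _
    simp
  have step : ∀ (qs : List (Int × List Int)) (pre : List Int),
      qs.foldl (fun r p => (PySem.List.pyRange 0 (PySem.List.len p.2) 1).foldl (fun vals j =>
          if PySem.Int.mod p.1 2 = PySem.Int.mod j 2 then vals ++ [PySem.List.pyGetD p.2 j 0]
          else vals) r) pre
      = qs.foldl (fun r p => r ++ ((PySem.List.enumerate p.2 0).filter
          (fun q => PySem.Int.mod p.1 2 == PySem.Int.mod q.1 2)).map (·.2)) pre := by
    intro qs pre
    exact PySem.List.foldl_congr_mem _ _ _ _ (fun acc q _ => hrow q acc)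
  rw [step]
  exact congrArg (fun z => (PySem.List.sorted z (fun x => x) false).foldl
      (fun ris v => if ris = [] ∨ PySem.List.pyGet? ris (-1) ≠ some v then ris ++ [v] else ris) [])
    (PySem.List.foldl_append_eq_flatMap _ _ [])

-- ===== VERDICT (by name: the statement is the Claim_ definition above) =====
theorem A_Ex1_spec : Claim_equal_A_Ex1 := by
  intro l _
  unfold Spec_A_Ex1
  rw [A_eq_sorted_memFold, B_eq_adjDedup_sorted]
  set V := pvVals l with hV
  set rhs := adjDedup (PySem.List.sorted V (fun x => x) false) with hrhs
  -- rhs is strictly increasing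
  have hsortedV : (PySem.List.sorted V (fun x => x) false).Pairwise (· ≤ ·) := by
    simpa using PySem.List.sorted_pairwise (xs := V) (key := fun x => x)
  have hpw : rhs.Pairwise (· < ·) :=
    adjDedup_pairwise_aux _ [] (by simp) hsortedV (by simp)
  -- rhs has the same members as memFold V []
  have hmemrhs : ∀ v, v ∈ rhs ↔ v ∈ V := by
    intro v
    rw [hrhs]
    unfold adjDedup
    rw [adjDedup_mem_aux]
    simp [PySem.List.mem_sorted]
  have hmemL : ∀ v, v ∈ memFold V [] ↔ v ∈ V := by
    intro v; rw [mem_memFold]; simp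
  -- both nodup → perm
  have hndL : (memFold V []).Nodup := nodup_memFold V [] (by simp)
  have hndR : rhs.Nodup := hpw.nodup
  have hperm : rhs.Perm (memFold V []) := by
    rw [List.perm_ext_iff_of_nodup hndR hndL]
    intro v; rw [hmemrhs v, hmemL v]
  exact PySem.List.sorted_eq_of_perm_of_pairwise_lt (memFold V []) rhs (fun x => x) hperm (by simpa using hpw)
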